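-- pv_equiv track=rewrite | github.com/scsystem1/ChemBO-Agent | knowledge/local_rag.py | _extract_identifier_value
-- ===== SOURCE A (Python) =====
-- from typing import Any
--
-- def _extract_identifier_value(
--     identifiers: list[dict[str, Any]] | None,
--     preferred_types: tuple[str, ...] = ("NAME", "REACTION_SMILES", "SMILES", "CUSTOM"),
-- ) -> str:
--     if not identifiers:
--         return ""
--     for preferred in preferred_types:
--         for item in identifiers:
--             if str(item.get("type", "")).upper() == preferred:
--                 value = str(item.get("value", "")).strip()
--                 if value:
--                     return value
--     for item in identifiers:
--         value = str(item.get("value", "")).strip()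
--         if value:
--             return value
--     return ""
-- ===== SOURCE B (Python) =====
-- def _extract_identifier_value(
--     identifiers,
--     preferred_types=("NAME", "REACTION_SMILES", "SMILES", "CUSTOM"),
-- ):
--     if not identifiers:
--         return ""
--     by_type = {}
--     first_any = ""
--     for item in identifiers:
--         value = str(item.get("value", "")).strip()
--         if not value:
--             continue
--         if not first_any:
--             first_any = value
--         t = str(item.get("type", "")).upper()
--         if t not in by_type:
--             by_type[t] = value
--     for preferred in preferred_types:
--         if preferred in by_type:
--             return by_type[preferred]
--     return first_any
-- ===== Notes on version B (the rewrite author's own statement) =====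
-- stated objective: alternative
-- what changed: Replaces A's up-to-five repeated scans of identifiers (one per preferred type plus a fallback pass) with a single indexing pass that records the first non-empty stripped value per uppercased type and the first non-empty value overall, followed by one dict lookup per preferred type.
import Mathlib
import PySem

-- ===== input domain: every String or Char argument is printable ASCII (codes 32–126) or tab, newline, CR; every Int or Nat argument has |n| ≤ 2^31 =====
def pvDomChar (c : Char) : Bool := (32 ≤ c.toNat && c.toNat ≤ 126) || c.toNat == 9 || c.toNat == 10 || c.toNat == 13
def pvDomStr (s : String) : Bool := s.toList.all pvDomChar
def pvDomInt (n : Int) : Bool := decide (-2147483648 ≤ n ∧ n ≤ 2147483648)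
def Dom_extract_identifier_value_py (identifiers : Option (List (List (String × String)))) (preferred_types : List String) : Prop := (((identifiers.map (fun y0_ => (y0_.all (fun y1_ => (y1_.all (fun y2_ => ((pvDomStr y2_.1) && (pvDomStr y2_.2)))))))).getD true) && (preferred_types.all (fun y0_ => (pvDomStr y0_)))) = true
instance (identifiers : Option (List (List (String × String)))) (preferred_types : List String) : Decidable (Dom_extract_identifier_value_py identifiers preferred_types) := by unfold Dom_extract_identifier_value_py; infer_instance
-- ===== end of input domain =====

-- B replaces A's up-to-five repeated scans with one indexing pass over the identifiers plus per-type lookups; return values proved equal on all inputs.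


-- dict.get(k, dflt) on an association list: first match (the dict convention)
def pyDictGetD (d : List (String × String)) (k dflt : String) : String :=
  match d.find? (fun p => p.1 == k) with
  | some p => p.2
  | none => dflt

-- ===== PORT A =====
-- inner 'for item in identifiers' of the preferred loop
def aScanPref (pref : String) : List (List (String × String)) → Option String
  | [] => none
  | item :: rest =>
    if PySem.Str.upper (pyDictGetD item "type" "") = pref then
      let value := PySem.Str.strip (pyDictGetD item "value" "")
      if value ≠ "" then some value else aScanPref pref rest
    else aScanPref pref rest

-- outer 'for preferred in preferred_types'
def aPrefLoop (l : List (List (String × String))) : List String → Option String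
  | [] => none
  | p :: ps =>
    match aScanPref p l with
    | some v => some v
    | none => aPrefLoop l ps

-- final fallback 'for item in identifiers'
def aScanAny : List (List (String × String)) → Option String
  | [] => none
  | item :: rest =>
    let value := PySem.Str.strip (pyDictGetD item "value" "")
    if value ≠ "" then some value else aScanAny rest

def extract_identifier_value_py (identifiers : Option (List (List (String × String)))) (preferred_types : List String) : String :=
  match identifiers with
  | none => ""
  | some l =>
    if l.isEmpty then ""
    else
      match aPrefLoop l preferred_types with
      | some v => v
      | none =>
        match aScanAny l with
        | some v => v
        | none => ""

-- ===== PORT B =====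
-- single indexing pass: (by_type, first_any)
def bStep (acc : PySem.Dict String String × String) (item : List (String × String)) :
    PySem.Dict String String × String :=
  let value := PySem.Str.strip (pyDictGetD item "value" "")
  if value = "" then acc
  else
    let firstAny := if acc.2 = "" then value else acc.2
    let t := PySem.Str.upper (pyDictGetD item "type" "")
    (acc.1.setdefault t value, firstAny)

def bIndex (l : List (List (String × String))) : PySem.Dict String String × String :=
  l.foldl bStep (PySem.Dict.empty, "")

-- 'for preferred in preferred_types: if preferred in by_type: return by_type[preferred]'
def bLookup (d : PySem.Dict String String) (firstAny : String) : List String → String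
  | [] => firstAny
  | p :: ps =>
    match d.get? p with
    | some v => v
    | none => bLookup d firstAny ps

def extract_identifier_value_py_alt (identifiers : Option (List (List (String × String)))) (preferred_types : List String) : String :=
  match identifiers with
  | none => ""
  | some l =>
    if l.isEmpty then ""
    else
      let idx := bIndex l
      bLookup idx.1 idx.2 preferred_types

-- ===== PRECONDITION & SPEC =====
def Spec_extract_identifier_value_py (identifiers : Option (List (List (String × String)))) (preferred_types : List String) (out : String) : Prop := out = extract_identifier_value_py_alt identifiers preferred_types
instance (identifiers : Option (List (List (String × String)))) (preferred_types : List String) (out : String) : Decidable (Spec_extract_identifier_value_py identifiers preferred_types out) := by unfold Spec_extract_identifier_value_py; infer_instance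

-- ===== CLAIM (what is proved, stated in full; the proofs are below) =====
def Claim_equal_extract_identifier_value_py : Prop := ∀ (identifiers : Option (List (List (String × String)))) (preferred_types : List String), Dom_extract_identifier_value_py identifiers preferred_types → Spec_extract_identifier_value_py identifiers preferred_types (extract_identifier_value_py identifiers preferred_types)

-- ===== LEMMAS AND PROOFS =====

-- the dict component of the fold: lookup = old lookup, else first matching non-empty value in l
theorem bIndex_get? (l : List (List (String × String))) (d : PySem.Dict String String)
    (fa : String) (p : String) :
    (l.foldl bStep (d, fa)).1.get? p =
      match d.get? p with
      | some w => some w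
      | none => aScanPref p l := by
  induction l generalizing d fa with
  | nil => cases h : d.get? p <;> simp [aScanPref, h]
  | cons item rest ih =>
    simp only [List.foldl_cons, bStep]
    by_cases hv : PySem.Str.strip (pyDictGetD item "value" "") = ""
    · rw [if_pos hv, ih]
      simp [aScanPref, hv]
    · rw [if_neg hv, ih]
      by_cases ht : PySem.Str.upper (pyDictGetD item "type" "") = p
      · rw [ht]
        cases h : d.get? p with
        | some w =>
          rw [PySem.Dict.get?_setdefault_self, h]
          simp
        | none =>
          rw [PySem.Dict.get?_setdefault_self, h]
          simp [aScanPref, ht, hv]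
      · rw [PySem.Dict.get?_setdefault_of_ne _ _ (fun h => ht h.symm)]
        simp [aScanPref, ht]

-- the first_any component of the fold
theorem bIndex_snd (l : List (List (String × String))) (d : PySem.Dict String String)
    (fa : String) :
    (l.foldl bStep (d, fa)).2 =
      if fa = "" then (aScanAny l).getD "" else fa := by
  induction l generalizing d fa with
  | nil => simp [aScanAny]
  | cons item rest ih =>
    simp only [List.foldl_cons, bStep]
    by_cases hv : PySem.Str.strip (pyDictGetD item "value" "") = ""
    · rw [if_pos hv, ih]
      simp [aScanAny, hv]
    · rw [if_neg hv, ih]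
      by_cases hfa : fa = ""
      · simp [aScanAny, hv, hfa]
      · simp [hfa]

-- the lookup loop equals A's preferred loop (given the two invariants above)
theorem bLookup_eq (l : List (List (String × String))) (prefs : List String) :
    bLookup (bIndex l).1 (bIndex l).2 prefs =
      match aPrefLoop l prefs with
      | some v => v
      | none =>
        match aScanAny l with
        | some v => v
        | none => "" := by
  induction prefs with
  | nil =>
    simp only [bLookup, aPrefLoop, bIndex]
    rw [bIndex_snd l PySem.Dict.empty ""]
    cases aScanAny l <;> simp
  | cons p ps ih =>
    simp only [bLookup, aPrefLoop]
    have hd : (bIndex l).1.get? p = aScanPref p l := by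
      unfold bIndex
      rw [bIndex_get? l PySem.Dict.empty "" p]
      simp [PySem.Dict.get?_empty]
    rw [hd]
    cases h : aScanPref p l with
    | some v => simp
    | none => simpa using ih

-- ===== VERDICT (by name: the statement is the Claim_ definition above) =====
theorem extract_identifier_value_py_spec : Claim_equal_extract_identifier_value_py := by
  intro identifiers preferred_types _
  unfold Spec_extract_identifier_value_py extract_identifier_value_py extract_identifier_value_py_alt
  cases identifiers with
  | none => rfl
  | some l =>
    by_cases hl : l.isEmpty
    · simp [hl]
    · simp only [hl]
      exact (bLookup_eq l preferred_types).symm
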